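-- pv_equiv track=rewrite | github.com/enochchau/adventofcode2022 | day15.py | part2
-- ===== SOURCE A (Python) =====
-- def m_dist(sx, sy, bx, by) -> int:
--     return abs(sx - bx) + abs(sy - by)
--
-- def check_point(lines, x, y):
--     found = True
--     for l in lines:
--         sx, sy, bx, by = l
--         distance = m_dist(sx, sy, bx, by)
--
--         d = m_dist(sx,sy, x, y)
--         found = found and d > distance
--
--         if not found:
--             return found
--
--     return found
--
-- def freq(x,y):
--     return x * 4000000 + y
--
-- def part2(lines, bound: int):
--     # we only have to check the points just outside the bounds
--
--     for l in lines:
--         sx, sy, bx, by = l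
--         distance = m_dist(sx, sy, bx, by)
--
--         for y in range(max(sy - distance, 0), min(sy + distance, bound) + 1):
--             y_dist = abs(sy - y)
--             x_dist = distance - y_dist
--             # check just outside x low and x high
--             xlow = sx - x_dist - 1
--             if xlow >= 0 and xlow <= bound:
--                 if check_point(lines, xlow, y):
--                     return freq(xlow, y)
--
--             xhigh = sx + x_dist + 1
--             if xhigh >= 0 and xhigh <= bound:
--                 if check_point(lines, xhigh, y):
--                     return freq(xhigh, y)
-- ===== SOURCE B (Python) =====
-- def m_dist(sx, sy, bx, by) -> int:
--     return abs(sx - bx) + abs(sy - by)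
--
-- def freq(x, y):
--     return x * 4000000 + y
--
-- def _first_free(lo, hi, ivs):
--     # ivs sorted by start: least y in [lo, hi] not inside any interval
--     cur = lo
--     for a, b in ivs:
--         if a <= cur <= b:
--             cur = b + 1
--     return cur if cur <= hi else None
--
-- def _seg_first(lo, hi, beta, alpha, lines):
--     # least y in [lo, hi] with point (alpha + beta*y, y) strictly outside
--     # every sensor's covered radius; each sensor covers an interval of y
--     # on this slope-±1 line, so merge intervals instead of testing points
--     ivs = []
--     for sx, sy, bx, by in lines:
--         r = m_dist(sx, sy, bx, by)
--         p = beta * (sx - alpha)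
--         q = sy
--         if abs(p - q) <= r:
--             ivs.append(((p + q - r + 1) // 2, (p + q + r) // 2))
--     ivs.sort(key=lambda iv: iv[0])
--     return _first_free(lo, hi, ivs)
--
-- def part2(lines, bound: int):
--     for sx, sy, bx, by in lines:
--         d = m_dist(sx, sy, bx, by)
--         y0 = max(sy - d, 0)
--         y1 = min(sy + d, bound)
--         aLL = sx - d - 1 + sy   # xlow  = aLL - y  for y <= sy
--         aLU = sx - d - 1 - sy   # xlow  = aLU + y  for y >= sy
--         aRL = sx + d + 1 - sy   # xhigh = aRL + y  for y <= sy
--         aRU = sx + d + 1 + sy   # xhigh = aRU - y  for y >= sy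
--         yL = _seg_first(max(y0, aLL - bound), min(min(y1, sy), aLL), -1, aLL, lines)
--         if yL is None:
--             yL = _seg_first(max(max(y0, sy), -aLU), min(y1, bound - aLU), 1, aLU, lines)
--         yR = _seg_first(max(y0, -aRL), min(min(y1, sy), bound - aRL), 1, aRL, lines)
--         if yR is None:
--             yR = _seg_first(max(max(y0, sy), aRU - bound), min(y1, aRU), -1, aRU, lines)
--         if yL is not None and (yR is None or yL <= yR):
--             return freq(sx - (d - abs(sy - yL)) - 1, yL)
--         if yR is not None:
--             return freq(sx + (d - abs(sy - yR)) + 1, yR)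
--     return None
-- ===== Notes on version B (the rewrite author's own statement) =====
-- stated objective: faster
-- what changed: A walks every y-row of each sensor's diamond and tests each boundary candidate point against all sensors; B treats each of the four slope-±1 boundary segments as a line, computes each sensor's coverage of that segment as a closed-form y-interval, and finds the first uncovered y by a single sorted interval sweep, so no per-point iteration or per-point membership test remains.
import Mathlib
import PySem

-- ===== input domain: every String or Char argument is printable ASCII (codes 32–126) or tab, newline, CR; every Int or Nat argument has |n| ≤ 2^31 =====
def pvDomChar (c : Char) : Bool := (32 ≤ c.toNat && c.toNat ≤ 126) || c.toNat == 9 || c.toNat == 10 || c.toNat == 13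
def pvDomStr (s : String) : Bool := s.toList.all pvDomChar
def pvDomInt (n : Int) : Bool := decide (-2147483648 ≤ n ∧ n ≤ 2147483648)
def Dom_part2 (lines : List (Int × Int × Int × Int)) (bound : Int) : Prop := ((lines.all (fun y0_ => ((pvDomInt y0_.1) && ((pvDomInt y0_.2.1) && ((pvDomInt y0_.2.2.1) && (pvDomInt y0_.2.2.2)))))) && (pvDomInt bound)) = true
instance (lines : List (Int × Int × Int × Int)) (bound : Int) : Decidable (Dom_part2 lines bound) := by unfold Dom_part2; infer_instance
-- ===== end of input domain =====

-- B replaces A's per-point scan of every y-row around each sensor by interval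
-- arithmetic on the four slope-±1 boundary segments of each sensor's diamond
-- (each sensor's coverage of such a segment is a y-interval; a sorted sweep
-- finds the first uncovered y), which avoids iterating over individual points.

-- ===== PORT A =====
def m_dist (sx sy bx b_y : Int) : Int := |sx - bx| + |sy - b_y|

def freq (x y : Int) : Int := x * 4000000 + y

def check_point : List (Int × Int × Int × Int) → Int → Int → Bool
  | [], _, _ => true
  | (sx, sy, bx, b_y) :: rest, x, y =>
      let distance := m_dist sx sy bx b_y
      let d := m_dist sx sy x y
      if d > distance then check_point rest x y else false

def part2_line (lines : List (Int × Int × Int × Int)) (bound sx sy distance : Int) : Option Int :=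
  (PySem.List.pyRange (max (sy - distance) 0) (min (sy + distance) bound + 1) 1).findSome? (fun y =>
    let y_dist := |sy - y|
    let x_dist := distance - y_dist
    let xlow := sx - x_dist - 1
    if 0 ≤ xlow ∧ xlow ≤ bound ∧ check_point lines xlow y = true then some (freq xlow y)
    else
      let xhigh := sx + x_dist + 1
      if 0 ≤ xhigh ∧ xhigh ≤ bound ∧ check_point lines xhigh y = true then some (freq xhigh y)
      else none)

def part2 (lines : List (Int × Int × Int × Int)) (bound : Int) : Option Int :=
  lines.findSome? (fun l => part2_line lines bound l.1 l.2.1 (m_dist l.1 l.2.1 l.2.2.1 l.2.2.2))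

-- ===== PORT B =====
def first_free (lo hi : Int) (ivs : List (Int × Int)) : Option Int :=
  let cur := ivs.foldl (fun cur ab => if ab.1 ≤ cur ∧ cur ≤ ab.2 then ab.2 + 1 else cur) lo
  if cur ≤ hi then some cur else none

def seg_ivs (beta alpha : Int) (lines : List (Int × Int × Int × Int)) : List (Int × Int) :=
  lines.foldl (fun acc l =>
    let r := m_dist l.1 l.2.1 l.2.2.1 l.2.2.2
    let p := beta * (l.1 - alpha)
    let q := l.2.1
    if |p - q| ≤ r then acc ++ [(PySem.Int.floordiv (p + q - r + 1) 2, PySem.Int.floordiv (p + q + r) 2)] else acc) []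

def seg_first (lo hi beta alpha : Int) (lines : List (Int × Int × Int × Int)) : Option Int :=
  first_free lo hi (PySem.List.sorted (seg_ivs beta alpha lines) (fun iv => iv.1) false)

def part2_alt_line (lines : List (Int × Int × Int × Int)) (bound sx sy bx b_y : Int) : Option Int :=
  let d := m_dist sx sy bx b_y
  let y0 := max (sy - d) 0
  let y1 := min (sy + d) bound
  let aLL := sx - d - 1 + sy
  let aLU := sx - d - 1 - sy
  let aRL := sx + d + 1 - sy
  let aRU := sx + d + 1 + sy
  let yL := match seg_first (max y0 (aLL - bound)) (min (min y1 sy) aLL) (-1) aLL lines with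
            | some c => some c
            | none => seg_first (max (max y0 sy) (-aLU)) (min y1 (bound - aLU)) 1 aLU lines
  let yR := match seg_first (max y0 (-aRL)) (min (min y1 sy) (bound - aRL)) 1 aRL lines with
            | some c => some c
            | none => seg_first (max (max y0 sy) (aRU - bound)) (min y1 aRU) (-1) aRU lines
  match yL, yR with
  | some cl, some cr =>
      if cl ≤ cr then some (freq (sx - (d - |sy - cl|) - 1) cl)
      else some (freq (sx + (d - |sy - cr|) + 1) cr)
  | some cl, none => some (freq (sx - (d - |sy - cl|) - 1) cl)
  | none, some cr => some (freq (sx + (d - |sy - cr|) + 1) cr)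
  | none, none => none

def part2_alt (lines : List (Int × Int × Int × Int)) (bound : Int) : Option Int :=
  lines.findSome? (fun l => part2_alt_line lines bound l.1 l.2.1 l.2.2.1 l.2.2.2)

-- ===== PRECONDITION & SPEC =====
def Spec_part2 (lines : List (Int × Int × Int × Int)) (bound : Int) (out : Option Int) : Prop := out = part2_alt lines bound
instance (lines : List (Int × Int × Int × Int)) (bound : Int) (out : Option Int) : Decidable (Spec_part2 lines bound out) := by unfold Spec_part2; infer_instance

-- ===== CLAIM (what is proved, stated in full; the proofs are below) =====
def Claim_equal_part2 : Prop := ∀ (lines : List (Int × Int × Int × Int)) (bound : Int), Dom_part2 lines bound → Spec_part2 lines bound (part2 lines bound)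

-- ===== LEMMAS AND PROOFS =====

/-- A point (x, y) is strictly outside every sensor's covered radius. -/
def FreeAt (lines : List (Int × Int × Int × Int)) (x y : Int) : Prop :=
  ∀ l ∈ lines, m_dist l.1 l.2.1 l.2.2.1 l.2.2.2 < m_dist l.1 l.2.1 x y

/-- `o` is the first y in [lo, hi] satisfying P (none if there is none). -/
def IsFirst (lo hi : Int) (P : Int → Prop) : Option Int → Prop
  | some c => lo ≤ c ∧ c ≤ hi ∧ P c ∧ ∀ y, lo ≤ y → y < c → ¬ P y
  | none => ∀ y, lo ≤ y → y ≤ hi → ¬ P y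

lemma IsFirst_congr {lo hi : Int} {P Q : Int → Prop} {o : Option Int}
    (hiff : ∀ y, lo ≤ y → y ≤ hi → (P y ↔ Q y)) (h : IsFirst lo hi P o) : IsFirst lo hi Q o := by
  cases o with
  | none => exact fun y h1 h2 hq => h y h1 h2 ((hiff y h1 h2).mpr hq)
  | some c =>
    obtain ⟨hl, hh, hp, hpre⟩ := h
    exact ⟨hl, hh, (hiff c hl hh).mp hp,
      fun y h1 h2 hq => hpre y h1 h2 ((hiff y h1 (le_trans (le_of_lt h2) hh)).mpr hq)⟩

lemma check_point_iff (lines : List (Int × Int × Int × Int)) (x y : Int) :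
    check_point lines x y = true ↔ FreeAt lines x y := by
  induction lines with
  | nil => simp [check_point, FreeAt]
  | cons l rest ih =>
    obtain ⟨sx, sy, bx, b_y⟩ := l
    simp only [check_point, FreeAt]
    split
    · rename_i hgt
      rw [ih]
      constructor
      · rintro hf l' hl'
        rcases List.mem_cons.mp hl' with rfl | hl'
        · exact hgt
        · exact hf l' hl'
      · intro hf l' hl'
        exact hf l' (List.mem_cons_of_mem _ hl')
    · rename_i hng
      constructor
      · intro hf; simp at hf
      · intro hf
        exact absurd (hf (sx, sy, bx, b_y) (by simp)) hng

lemma findSome?_pyRange_none_aux {g : Int → Option Int} :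
    ∀ (n : Nat) (a b : Int), (b - a).toNat = n → (∀ y, a ≤ y → y < b → g y = none) →
    (PySem.List.pyRange a b 1).findSome? g = none := by
  intro n
  induction n with
  | zero =>
    intro a b hn h
    rw [PySem.List.pyRange_one_eq_nil (by omega)]
    rfl
  | succ k ih =>
    intro a b hn h
    rw [PySem.List.pyRange_one_cons (by omega)]
    rw [List.findSome?_cons, h a le_rfl (by omega)]
    exact ih (a + 1) b (by omega) (fun y h1 h2 => h y (by omega) h2)

lemma findSome?_pyRange_none {g : Int → Option Int} (a b : Int)
    (h : ∀ y, a ≤ y → y < b → g y = none) :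
    (PySem.List.pyRange a b 1).findSome? g = none :=
  findSome?_pyRange_none_aux (b - a).toNat a b rfl h

lemma findSome?_pyRange_some_aux {g : Int → Option Int} :
    ∀ (n : Nat) (a b c v : Int), (b - a).toNat = n → a ≤ c → c < b → g c = some v →
    (∀ y, a ≤ y → y < c → g y = none) →
    (PySem.List.pyRange a b 1).findSome? g = some v := by
  intro n
  induction n with
  | zero => intro a b c v hn hac hcb _ _; omega
  | succ k ih =>
    intro a b c v hn hac hcb hc hpre
    rw [PySem.List.pyRange_one_cons (by omega)]
    rw [List.findSome?_cons]
    rcases eq_or_lt_of_le hac with rfl | hlt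
    · rw [hc]
    · rw [hpre a le_rfl hlt]
      exact ih (a + 1) b c v (by omega) (by omega) hcb hc
        (fun y h1 h2 => hpre y (by omega) h2)

lemma findSome?_pyRange_some {g : Int → Option Int} (a b c : Int) (v : Int)
    (hac : a ≤ c) (hcb : c < b) (hc : g c = some v)
    (hpre : ∀ y, a ≤ y → y < c → g y = none) :
    (PySem.List.pyRange a b 1).findSome? g = some v :=
  findSome?_pyRange_some_aux (b - a).toNat a b c v rfl hac hcb hc hpre

lemma foldl_cur_spec (ivs : List (Int × Int)) (lo : Int)
    (h : ivs.Pairwise (fun u v => u.1 ≤ v.1)) :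
    lo ≤ ivs.foldl (fun cur ab => if ab.1 ≤ cur ∧ cur ≤ ab.2 then ab.2 + 1 else cur) lo ∧
    (∀ iv ∈ ivs, ¬(iv.1 ≤ ivs.foldl (fun cur ab => if ab.1 ≤ cur ∧ cur ≤ ab.2 then ab.2 + 1 else cur) lo ∧
        ivs.foldl (fun cur ab => if ab.1 ≤ cur ∧ cur ≤ ab.2 then ab.2 + 1 else cur) lo ≤ iv.2)) ∧
    (∀ y, lo ≤ y → y < ivs.foldl (fun cur ab => if ab.1 ≤ cur ∧ cur ≤ ab.2 then ab.2 + 1 else cur) lo →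
        ∃ iv ∈ ivs, iv.1 ≤ y ∧ y ≤ iv.2) := by
  induction ivs generalizing lo with
  | nil =>
    refine ⟨le_rfl, by simp, fun y h1 h2 => absurd h2 (by simp; omega)⟩
  | cons ab rest ih =>
    obtain ⟨hhead, hpw⟩ := List.pairwise_cons.mp h
    simp only [List.foldl_cons]
    by_cases hf : ab.1 ≤ lo ∧ lo ≤ ab.2
    · rw [if_pos hf]
      obtain ⟨h1, h2, h3⟩ := ih (ab.2 + 1) hpw
      refine ⟨by omega, ?_, ?_⟩
      · intro iv hiv
        rcases List.mem_cons.mp hiv with rfl | hiv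
        · intro hc; omega
        · exact h2 iv hiv
      · intro y hy1 hy2
        by_cases hyb : y ≤ ab.2
        · exact ⟨ab, by simp, by omega, hyb⟩
        · obtain ⟨iv, hiv, hx⟩ := h3 y (by omega) hy2
          exact ⟨iv, List.mem_cons_of_mem _ hiv, hx⟩
    · rw [if_neg hf]
      obtain ⟨h1, h2, h3⟩ := ih lo hpw
      refine ⟨h1, ?_, ?_⟩
      · intro iv hiv
        rcases List.mem_cons.mp hiv with rfl | hiv
        · intro hc
          rcases not_and_or.mp hf with hlo | hlo
          · obtain ⟨iv', hiv', hx⟩ := h3 lo le_rfl (by omega)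
            have := hhead iv' hiv'
            omega
          · omega
        · exact h2 iv hiv
      · intro y hy1 hy2
        obtain ⟨iv, hiv, hx⟩ := h3 y hy1 hy2
        exact ⟨iv, List.mem_cons_of_mem _ hiv, hx⟩

lemma first_free_IsFirst (lo hi : Int) (ivs : List (Int × Int))
    (h : ivs.Pairwise (fun u v => u.1 ≤ v.1)) :
    IsFirst lo hi (fun y => ¬ ∃ iv ∈ ivs, iv.1 ≤ y ∧ y ≤ iv.2) (first_free lo hi ivs) := by
  obtain ⟨h1, h2, h3⟩ := foldl_cur_spec ivs lo h
  simp only [first_free]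
  split
  · rename_i hch
    refine ⟨h1, hch, ?_, ?_⟩
    · rintro ⟨iv, hiv, hx⟩
      exact h2 iv hiv hx
    · intro y hy1 hy2 hp
      exact hp (h3 y hy1 hy2)
  · rename_i hch
    intro y hy1 hy2 hp
    exact hp (h3 y hy1 (by omega))

lemma mem_seg_ivs_aux (beta alpha : Int) (lines : List (Int × Int × Int × Int))
    (acc : List (Int × Int)) (iv : Int × Int) :
    iv ∈ lines.foldl (fun acc l =>
      let r := m_dist l.1 l.2.1 l.2.2.1 l.2.2.2
      let p := beta * (l.1 - alpha)
      let q := l.2.1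
      if |p - q| ≤ r then acc ++ [(PySem.Int.floordiv (p + q - r + 1) 2, PySem.Int.floordiv (p + q + r) 2)] else acc) acc ↔
    iv ∈ acc ∨ ∃ l ∈ lines,
        (|beta * (l.1 - alpha) - l.2.1| ≤ m_dist l.1 l.2.1 l.2.2.1 l.2.2.2 ∧
         iv = (PySem.Int.floordiv (beta * (l.1 - alpha) + l.2.1 - m_dist l.1 l.2.1 l.2.2.1 l.2.2.2 + 1) 2,
               PySem.Int.floordiv (beta * (l.1 - alpha) + l.2.1 + m_dist l.1 l.2.1 l.2.2.1 l.2.2.2) 2)) := by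
  induction lines generalizing acc with
  | nil => simp
  | cons l rest ih =>
    simp only [List.foldl_cons]
    rw [ih]
    by_cases hc : |beta * (l.1 - alpha) - l.2.1| ≤ m_dist l.1 l.2.1 l.2.2.1 l.2.2.2
    · rw [if_pos hc]
      constructor
      · rintro (hacc | ⟨l', hl', hx⟩)
        · rcases List.mem_append.mp hacc with hml | hml
          · exact Or.inl hml
          · exact Or.inr ⟨l, by simp, hc, List.mem_singleton.mp hml⟩
        · exact Or.inr ⟨l', List.mem_cons_of_mem _ hl', hx⟩
      · rintro (hacc | ⟨l', hl', hx⟩)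
        · exact Or.inl (List.mem_append.mpr (Or.inl hacc))
        · rcases List.mem_cons.mp hl' with rfl | hl''
          · exact Or.inl (List.mem_append.mpr (Or.inr (List.mem_singleton.mpr hx.2)))
          · exact Or.inr ⟨l', hl'', hx⟩
    · rw [if_neg hc]
      constructor
      · rintro (hacc | ⟨l', hl', hx⟩)
        · exact Or.inl hacc
        · exact Or.inr ⟨l', List.mem_cons_of_mem _ hl', hx⟩
      · rintro (hacc | ⟨l', hl', hx⟩)
        · exact Or.inl hacc
        · rcases List.mem_cons.mp hl' with rfl | hl''
          · exact absurd hx.1 hc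
          · exact Or.inr ⟨l', hl'', hx⟩

lemma mem_seg_ivs (beta alpha : Int) (lines : List (Int × Int × Int × Int)) (iv : Int × Int) :
    iv ∈ seg_ivs beta alpha lines ↔
      ∃ l ∈ lines,
        (|beta * (l.1 - alpha) - l.2.1| ≤ m_dist l.1 l.2.1 l.2.2.1 l.2.2.2 ∧
         iv = (PySem.Int.floordiv (beta * (l.1 - alpha) + l.2.1 - m_dist l.1 l.2.1 l.2.2.1 l.2.2.2 + 1) 2,
               PySem.Int.floordiv (beta * (l.1 - alpha) + l.2.1 + m_dist l.1 l.2.1 l.2.2.1 l.2.2.2) 2)) := by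
  unfold seg_ivs
  rw [mem_seg_ivs_aux]
  simp

lemma interval_iff (beta alpha sx sy r y : Int) (hb : beta = 1 ∨ beta = -1) :
    (|beta * (sx - alpha) - sy| ≤ r ∧
     PySem.Int.floordiv (beta * (sx - alpha) + sy - r + 1) 2 ≤ y ∧
     y ≤ PySem.Int.floordiv (beta * (sx - alpha) + sy + r) 2)
    ↔ |sx - (alpha + beta * y)| + |sy - y| ≤ r := by
  rw [PySem.Int.floordiv_eq_ediv_of_pos (by norm_num),
      PySem.Int.floordiv_eq_ediv_of_pos (by norm_num)]
  rcases hb with rfl | rfl <;>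
    · simp only [Int.abs_eq_natAbs]
      omega

lemma covered_iff (beta alpha y : Int) (lines : List (Int × Int × Int × Int))
    (hb : beta = 1 ∨ beta = -1) :
    (∃ iv ∈ seg_ivs beta alpha lines, iv.1 ≤ y ∧ y ≤ iv.2) ↔
    ∃ l ∈ lines, m_dist l.1 l.2.1 (alpha + beta * y) y ≤ m_dist l.1 l.2.1 l.2.2.1 l.2.2.2 := by
  constructor
  · rintro ⟨iv, hiv, hy1, hy2⟩
    rw [mem_seg_ivs] at hiv
    obtain ⟨l, hl, hcond, rfl⟩ := hiv
    refine ⟨l, hl, ?_⟩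
    have := (interval_iff beta alpha l.1 l.2.1 (m_dist l.1 l.2.1 l.2.2.1 l.2.2.2) y hb).mp
      ⟨hcond, hy1, hy2⟩
    simpa [m_dist] using this
  · rintro ⟨l, hl, hd⟩
    have h2 := (interval_iff beta alpha l.1 l.2.1 (m_dist l.1 l.2.1 l.2.2.1 l.2.2.2) y hb).mpr
      (by simpa [m_dist] using hd)
    exact ⟨_, (mem_seg_ivs beta alpha lines _).mpr ⟨l, hl, h2.1, rfl⟩, h2.2.1, h2.2.2⟩

lemma seg_first_IsFirst (lo hi beta alpha : Int) (lines : List (Int × Int × Int × Int))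
    (hb : beta = 1 ∨ beta = -1) :
    IsFirst lo hi (fun y => FreeAt lines (alpha + beta * y) y) (seg_first lo hi beta alpha lines) := by
  have h := first_free_IsFirst lo hi
    (PySem.List.sorted (seg_ivs beta alpha lines) (fun iv => iv.1) false)
    (PySem.List.sorted_pairwise _ _)
  refine IsFirst_congr (fun y _ _ => ?_) h
  have hmem : (∃ iv ∈ PySem.List.sorted (seg_ivs beta alpha lines) (fun iv => iv.1) false,
      iv.1 ≤ y ∧ y ≤ iv.2) ↔ (∃ iv ∈ seg_ivs beta alpha lines, iv.1 ≤ y ∧ y ≤ iv.2) := by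
    constructor <;> rintro ⟨iv, hiv, hx⟩ <;>
      exact ⟨iv, by simpa [PySem.List.mem_sorted] using hiv, hx⟩
  rw [hmem, covered_iff beta alpha y lines hb]
  unfold FreeAt
  constructor
  · intro hne l hl
    by_contra hle
    exact hne ⟨l, hl, by omega⟩
  · rintro hfree ⟨l, hl, hd⟩
    have := hfree l hl
    omega

lemma IsFirst_sub {lo hi LO HI : Int} {P Q : Int → Prop} {o : Option Int}
    (hLO : lo ≤ LO) (hHI : HI ≤ hi)
    (h : IsFirst LO HI Q o)
    (hiff : ∀ y, lo ≤ y → y ≤ hi → (P y ↔ (LO ≤ y ∧ y ≤ HI ∧ Q y))) :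
    IsFirst lo hi P o := by
  cases o with
  | none =>
    intro y hy1 hy2 hp
    obtain ⟨hL, hH, hq⟩ := (hiff y hy1 hy2).mp hp
    exact h y hL hH hq
  | some c =>
    obtain ⟨h1, h2, h3, h4⟩ := h
    refine ⟨by omega, by omega, (hiff c (by omega) (by omega)).mpr ⟨h1, h2, h3⟩, ?_⟩
    intro y hy1 hy2 hp
    obtain ⟨hL, hH, hq⟩ := (hiff y hy1 (by omega)).mp hp
    exact h4 y hL hy2 hq

def pick1 (o1 o2 : Option Int) : Option Int :=
  match o1 with | some c => some c | none => o2

def pickLR (oL oR : Option Int) (vL vH : Int → Int) : Option Int :=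
  match oL, oR with
  | some cl, some cr => if cl ≤ cr then some (vL cl) else some (vH cr)
  | some cl, none => some (vL cl)
  | none, some cr => some (vH cr)
  | none, none => none

lemma IsFirst_split {y0 y1 m : Int} {P : Int → Prop} {o1 o2 : Option Int}
    (h1 : IsFirst y0 (min y1 m) P o1)
    (h2 : IsFirst (max y0 m) y1 P o2) :
    IsFirst y0 y1 P (pick1 o1 o2) := by
  cases o1 with
  | some c =>
    simp only [pick1]
    obtain ⟨ha, hb, hc, hd⟩ := h1
    exact ⟨ha, by omega, hc, hd⟩
  | none =>
    simp only [pick1]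
    cases o2 with
    | some c =>
      obtain ⟨ha, hb, hc, hd⟩ := h2
      refine ⟨by omega, hb, hc, ?_⟩
      intro y hy1 hy2 hp
      by_cases hym : y ≤ m
      · exact h1 y hy1 (by omega) hp
      · exact hd y (by omega) hy2 hp
    | none =>
      intro y hy1 hy2 hp
      by_cases hym : y ≤ m
      · exact h1 y hy1 (by omega) hp
      · exact h2 y (by omega) hy2 hp

lemma side_first (lines : List (Int × Int × Int × Int)) (bound y0 y1 sy : Int) (f : Int → Int)
    (al bl cl1 ch1 au bu cl2 ch2 : Int)
    (hbl : bl = 1 ∨ bl = -1) (hbu : bu = 1 ∨ bu = -1)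
    (hfl : ∀ y, y ≤ sy → f y = al + bl * y)
    (hfu : ∀ y, sy ≤ y → f y = au + bu * y)
    (hcl : ∀ y, (cl1 ≤ y ∧ y ≤ ch1) ↔ (0 ≤ al + bl * y ∧ al + bl * y ≤ bound))
    (hcu : ∀ y, (cl2 ≤ y ∧ y ≤ ch2) ↔ (0 ≤ au + bu * y ∧ au + bu * y ≤ bound)) :
    IsFirst y0 y1 (fun y => 0 ≤ f y ∧ f y ≤ bound ∧ FreeAt lines (f y) y)
      (pick1 (seg_first (max y0 cl1) (min (min y1 sy) ch1) bl al lines)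
             (seg_first (max (max y0 sy) cl2) (min y1 ch2) bu au lines)) := by
  apply IsFirst_split (m := sy)
  · refine IsFirst_sub (le_max_left _ _) (min_le_left _ _)
      (seg_first_IsFirst _ _ _ _ _ hbl) ?_
    intro y hy1 hy2
    have hysy : y ≤ sy := le_trans hy2 (min_le_right _ _)
    rw [hfl y hysy]
    have hcl' := hcl y
    constructor
    · rintro ⟨hv1, hv2, hfree⟩
      have hx := hcl'.mpr ⟨hv1, hv2⟩
      exact ⟨by omega, by omega, hfree⟩
    · rintro ⟨hL, hH, hfree⟩
      have hx := hcl'.mp ⟨by omega, by omega⟩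
      exact ⟨hx.1, hx.2, hfree⟩
  · refine IsFirst_sub (le_max_left _ _) (min_le_left _ _)
      (seg_first_IsFirst _ _ _ _ _ hbu) ?_
    intro y hy1 hy2
    have hysy : sy ≤ y := le_trans (le_max_right _ _) hy1
    rw [hfu y hysy]
    have hcu' := hcu y
    constructor
    · rintro ⟨hv1, hv2, hfree⟩
      have hx := hcu'.mpr ⟨hv1, hv2⟩
      exact ⟨by omega, by omega, hfree⟩
    · rintro ⟨hL, hH, hfree⟩
      have hx := hcu'.mp ⟨by omega, by omega⟩
      exact ⟨hx.1, hx.2, hfree⟩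

lemma findSome?_two (y0 y1 : Int) (g : Int → Option Int) (PL PR : Int → Prop)
    (vL vH : Int → Int) (oL oR : Option Int)
    (hgL : ∀ y, PL y → g y = some (vL y))
    (hgR : ∀ y, ¬PL y → PR y → g y = some (vH y))
    (hgN : ∀ y, ¬PL y → ¬PR y → g y = none)
    (HL : IsFirst y0 y1 PL oL) (HR : IsFirst y0 y1 PR oR) :
    (PySem.List.pyRange y0 (y1 + 1) 1).findSome? g = pickLR oL oR vL vH := by
  cases oL with
  | some cl =>
    obtain ⟨hl1, hl2, hl3, hl4⟩ := HL
    cases oR with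
    | some cr =>
      obtain ⟨hr1, hr2, hr3, hr4⟩ := HR
      simp only [pickLR]
      by_cases hcc : cl ≤ cr
      · rw [if_pos hcc]
        refine findSome?_pyRange_some y0 (y1 + 1) cl _ hl1 (by omega) (hgL cl hl3) ?_
        intro y hy1 hy2
        exact hgN y (hl4 y hy1 hy2) (hr4 y hy1 (by omega))
      · rw [if_neg hcc]
        refine findSome?_pyRange_some y0 (y1 + 1) cr _ hr1 (by omega) ?_ ?_
        · exact hgR cr (hl4 cr hr1 (by omega)) hr3
        · intro y hy1 hy2
          exact hgN y (hl4 y hy1 (by omega)) (hr4 y hy1 hy2)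
    | none =>
      simp only [pickLR]
      refine findSome?_pyRange_some y0 (y1 + 1) cl _ hl1 (by omega) (hgL cl hl3) ?_
      intro y hy1 hy2
      exact hgN y (hl4 y hy1 hy2) (HR y hy1 (by omega))
  | none =>
    cases oR with
    | some cr =>
      obtain ⟨hr1, hr2, hr3, hr4⟩ := HR
      simp only [pickLR]
      refine findSome?_pyRange_some y0 (y1 + 1) cr _ hr1 (by omega) ?_ ?_
      · exact hgR cr (HL cr hr1 hr2) hr3
      · intro y hy1 hy2
        exact hgN y (HL y hy1 (by omega)) (hr4 y hy1 hy2)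
    | none =>
      simp only [pickLR]
      refine findSome?_pyRange_none y0 (y1 + 1) ?_
      intro y hy1 hy2
      exact hgN y (HL y hy1 (by omega)) (HR y hy1 (by omega))

lemma line_core (lines : List (Int × Int × Int × Int)) (bound sx sy d : Int) :
    part2_line lines bound sx sy d =
      pickLR
        (pick1 (seg_first (max (max (sy - d) 0) (sx - d - 1 + sy - bound))
                          (min (min (min (sy + d) bound) sy) (sx - d - 1 + sy)) (-1)
                          (sx - d - 1 + sy) lines)
               (seg_first (max (max (max (sy - d) 0) sy) (-(sx - d - 1 - sy)))
                          (min (min (sy + d) bound) (bound - (sx - d - 1 - sy))) 1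
                          (sx - d - 1 - sy) lines))
        (pick1 (seg_first (max (max (sy - d) 0) (-(sx + d + 1 - sy)))
                          (min (min (min (sy + d) bound) sy) (bound - (sx + d + 1 - sy))) 1
                          (sx + d + 1 - sy) lines)
               (seg_first (max (max (max (sy - d) 0) sy) (sx + d + 1 + sy - bound))
                          (min (min (sy + d) bound) (sx + d + 1 + sy)) (-1)
                          (sx + d + 1 + sy) lines))
        (fun c => freq (sx - (d - |sy - c|) - 1) c)
        (fun c => freq (sx + (d - |sy - c|) + 1) c) := by
  have HL := side_first lines bound (max (sy - d) 0) (min (sy + d) bound) sy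
      (fun y => sx - (d - |sy - y|) - 1)
      (sx - d - 1 + sy) (-1) (sx - d - 1 + sy - bound) (sx - d - 1 + sy)
      (sx - d - 1 - sy) 1 (-(sx - d - 1 - sy)) (bound - (sx - d - 1 - sy))
      (Or.inr rfl) (Or.inl rfl)
      (by intro y hy; dsimp only; rw [abs_of_nonneg (by omega : (0:Int) ≤ sy - y)]; ring)
      (by intro y hy; dsimp only; rw [abs_of_nonpos (by omega : sy - y ≤ (0:Int))]; ring)
      (by intro y; omega)
      (by intro y; omega)
  have HR := side_first lines bound (max (sy - d) 0) (min (sy + d) bound) sy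
      (fun y => sx + (d - |sy - y|) + 1)
      (sx + d + 1 - sy) 1 (-(sx + d + 1 - sy)) (bound - (sx + d + 1 - sy))
      (sx + d + 1 + sy) (-1) (sx + d + 1 + sy - bound) (sx + d + 1 + sy)
      (Or.inl rfl) (Or.inr rfl)
      (by intro y hy; dsimp only; rw [abs_of_nonneg (by omega : (0:Int) ≤ sy - y)]; ring)
      (by intro y hy; dsimp only; rw [abs_of_nonpos (by omega : sy - y ≤ (0:Int))]; ring)
      (by intro y; omega)
      (by intro y; omega)
  simp only [part2_line]
  refine findSome?_two _ _ _ _ _ _ _ _ _ ?_ ?_ ?_ HL HR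
  · intro y hy
    obtain ⟨h1, h2, h3⟩ := hy
    rw [if_pos ⟨h1, h2, (check_point_iff lines _ y).mpr h3⟩]
  · intro y hnl hy
    obtain ⟨h1, h2, h3⟩ := hy
    rw [if_neg (fun hc => hnl ⟨hc.1, hc.2.1, (check_point_iff lines _ y).mp hc.2.2⟩),
        if_pos ⟨h1, h2, (check_point_iff lines _ y).mpr h3⟩]
  · intro y hnl hnr
    dsimp only
    rw [if_neg (fun hc => hnl ⟨hc.1, hc.2.1, (check_point_iff lines _ y).mp hc.2.2⟩),
        if_neg (fun hc => hnr ⟨hc.1, hc.2.1, (check_point_iff lines _ y).mp hc.2.2⟩)]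

lemma part2_line_eq (lines : List (Int × Int × Int × Int)) (bound sx sy bx b_y : Int) :
    part2_line lines bound sx sy (m_dist sx sy bx b_y) = part2_alt_line lines bound sx sy bx b_y := by
  rw [line_core]
  rfl

-- ===== VERDICT (by name: the statement is the Claim_ definition above) =====
theorem part2_spec : Claim_equal_part2 := by
  intro lines bound _
  unfold Spec_part2 part2 part2_alt
  congr 1
  funext l
  exact part2_line_eq lines bound l.1 l.2.1 l.2.2.1 l.2.2.2
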